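-- pv_equiv track=rewrite | github.com/Taroaka/toc | toc/stage_evaluator.py | _group_issue_messages
-- ===== SOURCE A (Python) =====
-- def _group_issue_messages(issues: list[str]) -> dict[str, list[str]]:
--     grouped: dict[str, list[str]] = {}
--     for issue in issues:
--         code = str(issue).split(":", 1)[0].strip()
--         if not code:
--             continue
--         grouped.setdefault(code, []).append(issue)
--     return grouped
-- ===== SOURCE B (Python) =====
-- def _group_issue_messages(issues: list[str]) -> dict[str, list[str]]:
--     # Two-phase: compute all codes once, then build each group with a single
--     # comprehension per distinct code (first-occurrence key order preserved).
--     codes = [str(issue).split(":", 1)[0].strip() for issue in issues]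
--     result: dict[str, list[str]] = {}
--     for c in codes:
--         if c and c not in result:
--             result[c] = [issue for issue, cc in zip(issues, codes) if cc == c]
--     return result
-- ===== Notes on version B (the rewrite author's own statement) =====
-- stated objective: alternative
-- what changed: Replaces A's single-pass setdefault-and-append accumulation with a two-phase scheme: compute every code once, then build each distinct code's group with one filtering comprehension over the precomputed (issue, code) pairs.
import Mathlib
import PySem

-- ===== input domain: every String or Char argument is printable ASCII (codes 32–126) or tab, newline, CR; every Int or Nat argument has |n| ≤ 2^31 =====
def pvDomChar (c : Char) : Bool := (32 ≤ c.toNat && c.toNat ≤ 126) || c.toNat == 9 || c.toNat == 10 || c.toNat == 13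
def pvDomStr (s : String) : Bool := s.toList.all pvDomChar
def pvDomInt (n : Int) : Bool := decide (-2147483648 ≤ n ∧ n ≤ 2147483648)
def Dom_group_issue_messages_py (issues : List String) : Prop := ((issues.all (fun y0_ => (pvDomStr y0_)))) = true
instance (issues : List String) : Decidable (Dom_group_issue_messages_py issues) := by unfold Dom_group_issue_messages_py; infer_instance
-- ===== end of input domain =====

-- B replaces A's single-pass setdefault accumulation with a two-phase scheme (codes precomputed
-- once, each distinct code's group built by one filter pass); alternative decomposition, not faster.

-- ===== PORT A =====
-- code = str(issue).split(":", 1)[0].strip()   (split with a nonempty separator never returns [],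
-- so the [0] index is the head; headD "" is exact here)
def codeOf (s : String) : String :=
  PySem.Str.strip ((((PySem.Str.splitMax? s ":" 1).getD []).headD ""))

-- grouped.setdefault(code, []).append(issue)  ==  grouped[code] = grouped.get(code, []) + [issue]
-- which is exactly PySem.Dict.modify (new keys appended at the end, as in Python).
def group_issue_messages_py (issues : List String) : List (String × List String) :=
  (issues.foldl
    (fun grouped issue =>
      let code := codeOf issue
      if code = "" then grouped
      else grouped.modify code [] (fun v => v ++ [issue]))
    PySem.Dict.empty).items

-- ===== PORT B =====
def group_issue_messages_py_alt (issues : List String) : List (String × List String) :=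
  let codes := issues.map codeOf
  (codes.foldl
    (fun result c =>
      if c ≠ "" ∧ result.contains c = false then
        result.insert c (((issues.zip codes).filter (fun p => p.2 == c)).map Prod.fst)
      else result)
    PySem.Dict.empty).items

-- ===== PRECONDITION & SPEC =====
def Spec_group_issue_messages_py (issues : List String) (out : List (String × List String)) : Prop := out = group_issue_messages_py_alt issues
instance (issues : List String) (out : List (String × List String)) : Decidable (Spec_group_issue_messages_py issues out) := by unfold Spec_group_issue_messages_py; infer_instance

-- ===== CLAIM (what is proved, stated in full; the proofs are below) =====
def Claim_equal_group_issue_messages_py : Prop := ∀ (issues : List String), Dom_group_issue_messages_py issues → Spec_group_issue_messages_py issues (group_issue_messages_py issues)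

-- ===== LEMMAS AND PROOFS =====

-- zipping a list with its own image under f and filtering on the image is filtering on f
theorem zip_map_filter_fst {α β : Type} [BEq β] (f : α → β) (c : β) :
    ∀ (l : List α),
      ((l.zip (l.map f)).filter (fun p => p.2 == c)).map Prod.fst
        = l.filter (fun s => f s == c) := by
  intro l
  induction l with
  | nil => rfl
  | cons x t ih =>
    simp only [List.map_cons, List.zip_cons_cons, List.filter_cons]
    by_cases h : (f x == c) = true
    · simp [h, ih]
    · simp only [h] at *
      simp [ih]

-- the value A's loop accumulates at a nonempty key c is the sublist of issues with code c
theorem foldA_getD (c : String) (hc : c ≠ "") :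
    ∀ (l : List String) (d : PySem.Dict String (List String)),
      (l.foldl
        (fun grouped issue =>
          let code := codeOf issue
          if code = "" then grouped
          else grouped.modify code [] (fun v => v ++ [issue])) d).getD c []
        = d.getD c [] ++ l.filter (fun s => codeOf s == c) := by
  intro l
  induction l with
  | nil => intro d; simp
  | cons s t ih =>
    intro d
    rw [List.foldl_cons, List.filter_cons]
    by_cases h : codeOf s = ""
    · have hne : (codeOf s == c) = false := by
        rw [h, beq_eq_false_iff_ne]
        exact Ne.symm hc
      rw [if_pos h, if_neg (by simp [hne])]
      exact ih d
    · rw [if_neg h, ih, PySem.Dict.getD_modify]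
      by_cases hcx : c = codeOf s
      · have heq : (codeOf s == c) = true := by simp [hcx]
        rw [if_pos hcx, if_pos heq]
        subst hcx
        simp
      · have hne : (codeOf s == c) = false := by
          rw [beq_eq_false_iff_ne]
          exact fun he => hcx he.symm
        rw [if_neg hcx, if_neg (by simp [hne])]

-- the keys A's loop produces are the old keys updated with the nonempty codes, in order
theorem foldA_keys :
    ∀ (l : List String) (d : PySem.Dict String (List String)),
      (l.foldl
        (fun grouped issue =>
          let code := codeOf issue
          if code = "" then grouped
          else grouped.modify code [] (fun v => v ++ [issue])) d).keys
        = PySem.Set.update d.keys ((l.map codeOf).filter (fun c => decide (c ≠ ""))) := by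
  intro l
  induction l with
  | nil => intro d; simp [PySem.Set.update]
  | cons s t ih =>
    intro d
    rw [List.foldl_cons, List.map_cons, List.filter_cons]
    by_cases h : codeOf s = ""
    · rw [if_pos h, if_neg (by simp [h])]
      exact ih d
    · rw [if_neg h, if_pos (by simp [h]), PySem.Set.update_cons, ih]
      congr 1
      rw [PySem.Dict.keys_modify]
      by_cases hm : codeOf s ∈ d.keys
      · rw [PySem.Dict.keys_insert_of_contains _ _
              (by rw [PySem.Dict.contains_eq_decide_mem_keys]; simp [hm]),
            PySem.Set.add_of_mem hm]
      · rw [PySem.Dict.keys_insert_of_not_contains _ _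
              (by rw [PySem.Dict.contains_eq_decide_mem_keys]; simp [hm]),
            PySem.Set.add_of_not_mem hm]

-- B's loop looks a key c up: old value if c was already a key, else V c if c occurs in cs
theorem foldB_getD (V : String → List String) (c : String) (hc : c ≠ "") :
    ∀ (cs : List String) (d : PySem.Dict String (List String)),
      (cs.foldl
        (fun result x =>
          if x ≠ "" ∧ result.contains x = false then result.insert x (V x) else result) d).getD c []
        = if d.contains c then d.getD c [] else if c ∈ cs then V c else [] := by
  intro cs
  induction cs with
  | nil =>
    intro d
    by_cases hd : d.contains c = true
    · simp [hd]
    · have hd' : d.contains c = false := by simpa using hd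
      rw [List.foldl_nil, if_neg (by simp [hd']),
          PySem.Dict.getD_of_not_contains _ _ hd']
      simp
  | cons x t ih =>
    intro d
    rw [List.foldl_cons]
    by_cases hx : x ≠ "" ∧ d.contains x = false
    · rw [if_pos hx, ih]
      by_cases hcx : c = x
      · subst hcx
        rw [if_pos (by rw [PySem.Dict.contains_insert]; simp),
            PySem.Dict.getD_insert, if_pos rfl,
            if_neg (by simp [hx.2]), if_pos (List.mem_cons_self)]
      · rw [PySem.Dict.contains_insert, PySem.Dict.getD_insert,
            if_neg hcx]
        have hne : (c == x) = false := by rw [beq_eq_false_iff_ne]; exact hcx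
        rw [hne, Bool.false_or]
        by_cases hd : d.contains c = true
        · simp [hd]
        · rw [if_neg hd, if_neg hd]
          simp [List.mem_cons, hcx]
    · rw [if_neg hx, ih]
      by_cases hcx : c = x
      · subst hcx
        have hd : d.contains c = true := by
          rcases not_and_or.mp hx with h1 | h2
          · exact absurd (not_not.mp h1) hc
          · cases hcc : d.contains c with
            | false => exact absurd hcc h2
            | true => rfl
        simp [hd]
      · by_cases hd : d.contains c = true
        · simp [hd]
        · rw [if_neg hd, if_neg hd]
          simp [List.mem_cons, hcx]

-- the keys B's loop produces: same update shape as A's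
theorem foldB_keys (V : String → List String) :
    ∀ (cs : List String) (d : PySem.Dict String (List String)),
      (cs.foldl
        (fun result x =>
          if x ≠ "" ∧ result.contains x = false then result.insert x (V x) else result) d).keys
        = PySem.Set.update d.keys (cs.filter (fun c => decide (c ≠ ""))) := by
  intro cs
  induction cs with
  | nil => intro d; simp [PySem.Set.update]
  | cons x t ih =>
    intro d
    rw [List.foldl_cons, List.filter_cons]
    by_cases hx0 : x = ""
    · rw [if_neg (fun hcon => hcon.1 hx0), if_neg (by simp [hx0])]
      exact ih d
    · by_cases hd : d.contains x = true
      · rw [if_neg (by simp [hd]), if_pos (by simp [hx0]), ih,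
            PySem.Set.update_cons,
            PySem.Set.add_of_mem (by
              rw [PySem.Dict.contains_eq_decide_mem_keys] at hd
              exact of_decide_eq_true hd)]
      · have hd' : d.contains x = false := by simpa using hd
        rw [if_pos ⟨hx0, hd'⟩, if_pos (by simp [hx0]), ih,
            PySem.Set.update_cons,
            PySem.Dict.keys_insert_of_not_contains _ _ hd',
            PySem.Set.add_of_not_mem (by
              rw [PySem.Dict.contains_eq_decide_mem_keys] at hd'
              simpa using hd')]

-- ===== VERDICT (by name: the statement is the Claim_ definition above) =====
theorem group_issue_messages_py_spec : Claim_equal_group_issue_messages_py := by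
  intro issues _
  unfold Spec_group_issue_messages_py group_issue_messages_py group_issue_messages_py_alt
  set V : String → List String :=
    fun c => ((issues.zip (issues.map codeOf)).filter (fun p => p.2 == c)).map Prod.fst with hV
  have hAk := foldA_keys issues PySem.Dict.empty
  have hBk := foldB_keys V (issues.map codeOf) PySem.Dict.empty
  simp only [PySem.Dict.keys_empty, PySem.Set.update_nil_left] at hAk hBk
  have hnodA : _ := hAk ▸ PySem.Set.nodup_ofList _
  have hnodB : _ := hBk ▸ PySem.Set.nodup_ofList _
  rw [PySem.Dict.items_eq_map_keys _ hnodA ([] : List String),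
      PySem.Dict.items_eq_map_keys _ hnodB ([] : List String), hAk, hBk]
  apply List.map_congr_left
  intro k hk
  have hk' : k ∈ (issues.map codeOf).filter (fun c => decide (c ≠ "")) :=
    (PySem.Set.mem_ofList _ _).mp hk
  have hkne : k ≠ "" := by
    have := List.of_mem_filter hk'
    simpa using this
  have hkmem : k ∈ issues.map codeOf := List.mem_of_mem_filter hk'
  rw [foldA_getD k hkne, foldB_getD V k hkne]
  rw [PySem.Dict.contains_empty, if_neg (by simp), if_pos hkmem]
  simp [hV, zip_map_filter_fst]
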